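-- pv_equiv track=rewrite | github.com/cry999/AtCoder | beginner/127/E.py | cell_distance
-- ===== SOURCE A (Python) =====
-- def mod_inv(n: int, mod: int)->int:
--     b, u, v = mod, 1, 0
--     while b > 0:
--         t = n // b
--
--         n -= t * b
--         u -= t * v
--
--         n, b = b, n
--         u, v = v, u
--
--     return (u+mod) % mod
--
-- def cell_distance(N: int, M: int, K: int)->int:
--     MOD = 10**9 + 7
--
--     C = 1
--     for k in range(K-2):
--         C *= (N*M - K + k + 1)
--         C %= MOD
--         C *= mod_inv(k+1, MOD)
--         C %= MOD
--
--     S = 0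
--     for d in range(N):
--         S += d * (N-d) * M * M
--         S %= MOD
--
--     for d in range(M):
--         S += d * (M-d) * N * N
--         S %= MOD
--
--     S *= C
--     S %= MOD
--
--     return S
-- ===== SOURCE B (Python) =====
-- def mod_inv(n: int, mod: int) -> int:
--     b, u, v = mod, 1, 0
--     while b > 0:
--         t = n // b
--         n -= t * b
--         u -= t * v
--         n, b = b, n
--         u, v = v, u
--     return (u + mod) % mod
--
--
-- def cell_distance(N: int, M: int, K: int) -> int:
--     MOD = 10**9 + 7
--
--     num = N * M - K + 1
--     C = 1
--     for k in range(K - 2):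
--         C = C * (num + k) % MOD * mod_inv(k + 1, MOD) % MOD
--
--     # sum_{d=0}^{n-1} d*(n-d) = (n^3 - n) // 6  (0 for an empty range)
--     tN = (N * N * N - N) // 6 if N > 0 else 0
--     tM = (M * M * M - M) // 6 if M > 0 else 0
--     S = (M * M * tN + N * N * tM) % MOD
--
--     return S * C % MOD
-- ===== Notes on version B (the rewrite author's own statement) =====
-- stated objective: alternative
-- what changed: The two O(N) and O(M) distance-sum loops are replaced by the closed-form identity sum_{d<n} d*(n-d) = (n^3-n)/6, computed in O(1); the K-term binomial loop is kept, so overall cost is dominated by K.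
import Mathlib
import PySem

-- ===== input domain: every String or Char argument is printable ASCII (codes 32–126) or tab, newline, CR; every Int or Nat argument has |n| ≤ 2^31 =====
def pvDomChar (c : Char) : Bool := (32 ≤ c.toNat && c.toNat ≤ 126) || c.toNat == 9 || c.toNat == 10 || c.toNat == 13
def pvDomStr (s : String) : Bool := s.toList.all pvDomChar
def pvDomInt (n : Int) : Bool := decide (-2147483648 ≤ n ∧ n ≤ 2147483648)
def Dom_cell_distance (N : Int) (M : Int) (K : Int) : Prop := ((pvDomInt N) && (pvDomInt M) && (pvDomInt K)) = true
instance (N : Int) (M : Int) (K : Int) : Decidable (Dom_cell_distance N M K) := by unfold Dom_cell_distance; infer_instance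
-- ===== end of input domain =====

-- B replaces the two O(N)+O(M) distance-sum loops of A by the closed-form (n^3-n)/6 formulas; the binomial-coefficient loop stays.

-- ===== PORT A =====
-- shared helper: Python mod_inv (extended Euclid), used verbatim by both Pythons
def modInvLoop (n b u v : Int) : Int :=
  if h : b > 0 then
    let t := PySem.Int.floordiv n b
    modInvLoop b (n - t * b) v (u - t * v)
  else u
termination_by b.toNat
decreasing_by
  have heq : n - PySem.Int.floordiv n b * b = PySem.Int.mod n b := by
    have := PySem.Int.floordiv_mul_add_mod n b; omega
  have h1 := PySem.Int.mod_nonneg n h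
  have h2 := PySem.Int.mod_lt n h
  omega

def mod_inv (n mod : Int) : Int :=
  PySem.Int.mod (modInvLoop n mod 1 0 + mod) mod

def cell_distance (N : Int) (M : Int) (K : Int) : Int :=
  let MOD : Int := 1000000007
  let C := (PySem.List.pyRange 0 (K - 2) 1).foldl
    (fun C k => PySem.Int.mod (PySem.Int.mod (C * (N * M - K + k + 1)) MOD * mod_inv (k + 1) MOD) MOD) 1
  let S := (PySem.List.pyRange 0 N 1).foldl
    (fun S d => PySem.Int.mod (S + d * (N - d) * M * M) MOD) 0
  let S2 := (PySem.List.pyRange 0 M 1).foldl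
    (fun S d => PySem.Int.mod (S + d * (M - d) * N * N) MOD) S
  PySem.Int.mod (S2 * C) MOD

-- ===== PORT B =====
def cell_distance_alt (N : Int) (M : Int) (K : Int) : Int :=
  let MOD : Int := 1000000007
  let num := N * M - K + 1
  let C := (PySem.List.pyRange 0 (K - 2) 1).foldl
    (fun C k => PySem.Int.mod (PySem.Int.mod (C * (num + k)) MOD * mod_inv (k + 1) MOD) MOD) 1
  let tN := if N > 0 then PySem.Int.floordiv (N * N * N - N) 6 else 0
  let tM := if M > 0 then PySem.Int.floordiv (M * M * M - M) 6 else 0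
  let S := PySem.Int.mod (M * M * tN + N * N * tM) MOD
  PySem.Int.mod (S * C) MOD

-- ===== PRECONDITION & SPEC =====
def Spec_cell_distance (N : Int) (M : Int) (K : Int) (out : Int) : Prop := out = cell_distance_alt N M K
instance (N : Int) (M : Int) (K : Int) (out : Int) : Decidable (Spec_cell_distance N M K out) := by unfold Spec_cell_distance; infer_instance

-- ===== CLAIM (what is proved, stated in full; the proofs are below) =====
def Claim_equal_cell_distance : Prop := ∀ (N : Int) (M : Int) (K : Int), Dom_cell_distance N M K → Spec_cell_distance N M K (cell_distance N M K)

-- ===== LEMMAS AND PROOFS =====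

-- folding "(s + f d) % P" equals adding the whole sum and reducing once
lemma foldl_addmod (P : Int) (hP : 0 < P) (f : Int → Int) (l : List Int) (s : Int) :
    l.foldl (fun s d => PySem.Int.mod (s + f d) P) (s % P) = (s + (l.map f).sum) % P := by
  induction l generalizing s with
  | nil => simp
  | cons a t ih =>
    simp only [List.foldl_cons]
    have hstep : PySem.Int.mod (s % P + f a) P = (s + f a) % P := by
      rw [PySem.Int.mod_eq_emod_of_pos hP]
      exact Int.emod_add_emod s P (f a)
    rw [hstep, ih (s + f a)]
    simp only [List.map_cons, List.sum_cons]
    congr 1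
    ring

-- 6 * Σ_{k<m} k*(n-k)*c, closed form
lemma sum_dist_gen (c n : Int) (m : Nat) :
    6 * ((List.range m).map (fun k : Nat => (k : Int) * (n - (k : Int)) * c)).sum
      = (3 * n * m * (m - 1) - m * (m - 1) * (2 * m - 1)) * c := by
  induction m with
  | zero => simp
  | succ m ih =>
    simp only [List.range_succ, List.map_append, List.map_cons, List.map_nil,
      List.sum_append, List.sum_cons, List.sum_nil]
    push_cast at ih ⊢
    linear_combination ih

lemma floordiv_six (x : Int) : PySem.Int.floordiv (6 * x) 6 = x := by
  rw [PySem.Int.floordiv_eq_iff_of_pos (by norm_num)]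
  omega

lemma six_dvd_cube_sub (n : Int) : (6 : Int) ∣ (n * n * n - n) := by
  have h2 : (2:Int) ∣ (n * n * n - n) := by
    rcases Int.even_mul_succ_self (n - 1) with ⟨k, hk⟩
    exact ⟨k * (n + 1), by linear_combination (n + 1) * hk⟩
  have h3 : (3:Int) ∣ (n * n * n - n) := by
    have hm : n % 3 = 0 ∨ n % 3 = 1 ∨ n % 3 = 2 := by omega
    obtain ⟨q, hq⟩ : ∃ q, n = 3 * q + n % 3 := ⟨n / 3, by omega⟩
    rcases hm with h | h | h <;> rw [h] at hq
    · exact ⟨9 * q * q * q - q, by rw [hq]; ring⟩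
    · exact ⟨9 * q * q * q + 9 * q * q + 2 * q, by rw [hq]; ring⟩
    · exact ⟨9 * q * q * q + 18 * q * q + 11 * q + 2, by rw [hq]; ring⟩
  omega

-- the sum over range n of d*(n-d)*c equals the closed form used by B
lemma sum_dist (n c : Int) :
    ((PySem.List.pyRange 0 n 1).map (fun d => d * (n - d) * c)).sum
      = (if n > 0 then PySem.Int.floordiv (n * n * n - n) 6 else 0) * c := by
  by_cases hn : n > 0
  · simp only [hn, if_pos]
    rw [PySem.List.pyRange_one, List.map_map]
    have hs : ((List.range (n - 0).toNat).map ((fun d => d * (n - d) * c) ∘ fun k : Nat => 0 + (k : Int))).sum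
        = ((List.range (n - 0).toNat).map (fun k : Nat => (k : Int) * (n - (k : Int)) * c)).sum := by
      congr 1
      apply List.map_congr_left
      intro k _
      simp
    rw [hs]
    have hcast : ((n - 0).toNat : Int) = n := by omega
    have key : 6 * ((List.range (n - 0).toNat).map (fun k : Nat => (k : Int) * (n - (k : Int)) * c)).sum
        = (n * n * n - n) * c := by
      rw [sum_dist_gen c n (n - 0).toNat, hcast]
      ring
    rcases six_dvd_cube_sub n with ⟨q, hq⟩
    have hfd : PySem.Int.floordiv (n * n * n - n) 6 = q := by rw [hq]; exact floordiv_six q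
    rw [hfd]
    have : 6 * ((List.range (n - 0).toNat).map (fun k : Nat => (k : Int) * (n - (k : Int)) * c)).sum
        = 6 * (q * c) := by rw [key, hq]; ring
    linarith
  · simp only [hn]
    rw [PySem.List.pyRange_one_eq_nil (by omega)]
    simp

-- ===== VERDICT (by name: the statement is the Claim_ definition above) =====
theorem cell_distance_spec : Claim_equal_cell_distance := by
  intro N M K _
  unfold Spec_cell_distance cell_distance cell_distance_alt
  simp only []
  -- C folds agree: the loop bodies differ only by (N*M-K+k+1) vs ((N*M-K+1)+k)
  have hC : (PySem.List.pyRange 0 (K - 2) 1).foldl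
      (fun C k => PySem.Int.mod (PySem.Int.mod (C * (N * M - K + k + 1)) 1000000007 * mod_inv (k + 1) 1000000007) 1000000007) 1
    = (PySem.List.pyRange 0 (K - 2) 1).foldl
      (fun C k => PySem.Int.mod (PySem.Int.mod (C * (N * M - K + 1 + k)) 1000000007 * mod_inv (k + 1) 1000000007) 1000000007) 1 := by
    congr 1
    funext C k
    ring_nf
  rw [hC]
  -- S folds: replace by sums
  have hP : (0:Int) < 1000000007 := by norm_num
  have h1 : (PySem.List.pyRange 0 N 1).foldl
      (fun S d => PySem.Int.mod (S + d * (N - d) * M * M) 1000000007) 0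
      = (0 + ((PySem.List.pyRange 0 N 1).map (fun d => d * (N - d) * (M * M))).sum) % 1000000007 := by
    have := foldl_addmod 1000000007 hP (fun d => d * (N - d) * (M * M)) (PySem.List.pyRange 0 N 1) 0
    simp only [Int.zero_emod] at this
    rw [← this]
    congr 1
    funext S d
    ring_nf
  have hS1 := sum_dist N (M * M)
  have hS2 := sum_dist M (N * N)
  rw [h1, hS1]
  set tN := (if N > 0 then PySem.Int.floordiv (N * N * N - N) 6 else 0) with htN
  set tM := (if M > 0 then PySem.Int.floordiv (M * M * M - M) 6 else 0) with htM
  have h2 : (PySem.List.pyRange 0 M 1).foldl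
      (fun S d => PySem.Int.mod (S + d * (M - d) * N * N) 1000000007)
      ((0 + tN * (M * M)) % 1000000007)
      = (0 + tN * (M * M) + ((PySem.List.pyRange 0 M 1).map (fun d => d * (M - d) * (N * N))).sum) % 1000000007 := by
    have := foldl_addmod 1000000007 hP (fun d => d * (M - d) * (N * N)) (PySem.List.pyRange 0 M 1) (0 + tN * (M * M))
    rw [← this]
    congr 1
    funext S d
    ring_nf
  rw [h2, hS2]
  -- both sides: ((stuff) % P * C) % P with equal stuff
  have harg : 0 + tN * (M * M) + tM * (N * N) = M * M * tN + N * N * tM := by ring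
  rw [harg]
  simp [Int.mul_emod, Int.emod_emod_of_dvd]
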